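-- pv_equiv track=rewrite | github.com/Noridom1/MultimodalQuiz | scripts/visualize_questions.py | _resolve_correct_index
-- ===== SOURCE A (Python) =====
-- def _resolve_correct_index(correct_raw: str, options: list[str]) -> int:
--     """Return the 0-based index of the correct option.
--
--     Handles three formats:
--     - Letter label:  "A", "B", "C", "D"
--     - Numeric label: "1", "2", "3", "4"
--     - Full text:     the exact (or contained) option text
--     """
--     if not correct_raw or not options:
--         return -1
--
--     # Letter label – strip trailing punctuation/space just in case
--     upper = correct_raw.upper().rstrip(").: ")
--     if len(upper) == 1 and upper.isalpha():
--         idx = ord(upper) - ord("A")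
--         return idx if 0 <= idx < len(options) else -1
--
--     # Numeric label
--     if correct_raw.isdigit():
--         idx = int(correct_raw) - 1
--         return idx if 0 <= idx < len(options) else -1
--
--     # Full text – try exact match, then containment
--     for i, opt in enumerate(options):
--         if opt.strip() == correct_raw:
--             return i
--     for i, opt in enumerate(options):
--         if correct_raw in opt or opt in correct_raw:
--             return i
--
--     return -1
-- ===== SOURCE B (Python) =====
-- def _label_index(correct_raw):
--     """Return the 0-based index encoded by a letter/numeric label, else None."""
--     upper = correct_raw.upper().rstrip(").: ")
--     if len(upper) == 1 and upper.isalpha():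
--         return ord(upper) - ord("A")
--     if correct_raw.isdigit():
--         return int(correct_raw) - 1
--     return None
--
--
-- def _resolve_correct_index(correct_raw: str, options: list[str]) -> int:
--     """Scoring variant: label handling is factored into a helper; the text case
--     ranks every option by a match tier (0 = exact stripped match, 1 = containment)
--     in one pass and returns the index of the best-ranked (lowest tier, first) option."""
--     if not correct_raw or not options:
--         return -1
--
--     idx = _label_index(correct_raw)
--     if idx is not None:
--         return idx if 0 <= idx < len(options) else -1
--
--     best = None  # (tier, index); a later option only wins with a strictly lower tier
--     for i, opt in enumerate(options):
--         if opt.strip() == correct_raw: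
--             tier = 0
--         elif best is not None:
--             continue  # a tier-1 candidate can never beat the held best
--         elif correct_raw in opt or opt in correct_raw:
--             tier = 1
--         else:
--             continue
--         if best is None or tier < best[0]:
--             best = (tier, i)
--         if best[0] == 0:
--             break  # an exact match cannot be beaten
--     return -1 if best is None else best[1]
-- ===== Notes on version B (the rewrite author's own statement) =====
-- stated objective: alternative
-- what changed: The letter/numeric label branches are factored into a helper returning an optional index, and A's two sequential text scans (exact, then containment) are replaced by a single scoring pass that ranks each option by a match tier (0 = exact stripped match, 1 = containment) and keeps the best-ranked earliest option.
import Mathlib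
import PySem

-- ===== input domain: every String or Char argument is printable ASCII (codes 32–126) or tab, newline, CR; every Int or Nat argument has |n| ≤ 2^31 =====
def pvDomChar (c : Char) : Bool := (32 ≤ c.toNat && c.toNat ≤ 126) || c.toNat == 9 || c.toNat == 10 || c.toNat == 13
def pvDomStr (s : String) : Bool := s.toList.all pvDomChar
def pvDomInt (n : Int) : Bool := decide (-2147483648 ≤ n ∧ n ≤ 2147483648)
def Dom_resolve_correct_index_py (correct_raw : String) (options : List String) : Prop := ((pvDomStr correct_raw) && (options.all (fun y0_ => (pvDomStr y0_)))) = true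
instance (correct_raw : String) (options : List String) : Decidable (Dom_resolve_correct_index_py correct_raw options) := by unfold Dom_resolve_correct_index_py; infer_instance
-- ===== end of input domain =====

-- B factors the label cases into a helper and replaces A's two sequential text scans by one
-- scoring pass (tier 0 = exact, tier 1 = containment, best tier & earliest index wins); same
-- result by a different decomposition (objective: alternative).

-- ===== PORT A =====
-- str.rstrip(chars): drop trailing characters that occur in `chars` (exact port, PySem has no rstrip-with-chars)
def pvRstripChars (cs : List Char) (chars : List Char) : List Char :=
  (cs.reverse.dropWhile (fun c => chars.contains c)).reverse

-- 'for i, opt in enumerate(options): if opt.strip() == correct_raw: return i'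
def pvExactScanA (cr : List Char) (i : Int) : List String → Option Int
  | [] => none
  | opt :: t => if PySem.Chars.strip opt.toList = cr then some i else pvExactScanA cr (i + 1) t

-- 'for i, opt in enumerate(options): if correct_raw in opt or opt in correct_raw: return i'
def pvContainScanA (cr : List Char) (i : Int) : List String → Option Int
  | [] => none
  | opt :: t =>
      if PySem.Chars.isIn cr opt.toList || PySem.Chars.isIn opt.toList cr then some i
      else pvContainScanA cr (i + 1) t

def resolve_correct_index_py (correct_raw : String) (options : List String) : Int :=
  let cr := correct_raw.toList
  if cr.isEmpty || options.isEmpty then -1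
  else
    let upper := pvRstripChars (PySem.Chars.upper cr) [')', '.', ':', ' ']
    if upper.length = 1 ∧ PySem.Chars.strIsalpha upper then
      let idx : Int := (upper.headD ' ').toNat - 65
      if 0 ≤ idx ∧ idx < (options.length : Int) then idx else -1
    else if PySem.Chars.strIsdigit cr then
      -- int(correct_raw): never raises here, the isdigit guard holds (getD's default is unreachable)
      let idx : Int := (PySem.Int.ofChars? cr).getD 0 - 1
      if 0 ≤ idx ∧ idx < (options.length : Int) then idx else -1
    else
      match pvExactScanA cr 0 options with
      | some i => i
      | none =>
        match pvContainScanA cr 0 options with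
        | some i => i
        | none => -1

-- ===== PORT B =====
-- helper '_label_index': the 0-based index encoded by a letter/numeric label, else none
def pvLabelIndexB (cr : List Char) : Option Int :=
  let upper := pvRstripChars (PySem.Chars.upper cr) [')', '.', ':', ' ']
  if upper.length = 1 ∧ PySem.Chars.strIsalpha upper then
    some ((upper.headD ' ').toNat - 65)
  else if PySem.Chars.strIsdigit cr then
    -- int(correct_raw): never raises here, the isdigit guard holds (getD's default is unreachable)
    some ((PySem.Int.ofChars? cr).getD 0 - 1)
  else none

-- the scoring loop: each option's match tier (0 = exact stripped match, 1 = containment) is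
-- computed lazily ('continue' once a best is held, since tier 1 can never beat it); `best` is
-- replaced only by a strictly lower tier, and tier 0 cannot be beaten, so break
def pvBestScanB (cr : List Char) (i : Int) (best : Option (Int × Int)) : List String → Option (Int × Int)
  | [] => best
  | opt :: t =>
      let tier? : Option Int :=
        if PySem.Chars.strip opt.toList = cr then some 0
        else
          match best with
          | some _ => none
          | none => if PySem.Chars.isIn cr opt.toList || PySem.Chars.isIn opt.toList cr then some 1 else none
      match tier? with
      | none => pvBestScanB cr (i + 1) best t
      | some tr =>
        let best' :=
          match best with
          | none => some (tr, i)
          | some b => if tr < b.1 then some (tr, i) else some b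
        match best' with
        | some (0, _) => best'
        | _ => pvBestScanB cr (i + 1) best' t

def resolve_correct_index_py_alt (correct_raw : String) (options : List String) : Int :=
  let cr := correct_raw.toList
  if cr.isEmpty || options.isEmpty then -1
  else
    match pvLabelIndexB cr with
    | some idx => if 0 ≤ idx ∧ idx < (options.length : Int) then idx else -1
    | none =>
      match pvBestScanB cr 0 none options with
      | some b => b.2
      | none => -1

-- ===== PRECONDITION & SPEC =====
def Spec_resolve_correct_index_py (correct_raw : String) (options : List String) (out : Int) : Prop := out = resolve_correct_index_py_alt correct_raw options
instance (correct_raw : String) (options : List String) (out : Int) : Decidable (Spec_resolve_correct_index_py correct_raw options out) := by unfold Spec_resolve_correct_index_py; infer_instance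

-- ===== CLAIM (what is proved, stated in full; the proofs are below) =====
def Claim_equal_resolve_correct_index_py : Prop := ∀ (correct_raw : String) (options : List String), Dom_resolve_correct_index_py correct_raw options → Spec_resolve_correct_index_py correct_raw options (resolve_correct_index_py correct_raw options)

-- ===== LEMMAS AND PROOFS =====

-- reading off the answer from a best-so-far / the scan's result
def pvAnswer (b : Option (Int × Int)) : Int :=
  match b with
  | some p => p.2
  | none => -1

-- the scoring scan, finished off, for each of the three reachable `best` shapes:
-- a held exact match is final; a held containment match is beaten only by a later exact match;
-- from nothing, it is "first exact, else first containment, else -1".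
theorem pvBestScanB_spec (cr : List Char) (options : List String) :
    ∀ (i : Int),
      (∀ j : Int, pvAnswer (pvBestScanB cr i (some (1, j)) options) =
         (match pvExactScanA cr i options with
          | some k => k
          | none => j)) ∧
      (pvAnswer (pvBestScanB cr i none options) =
         (match pvExactScanA cr i options with
          | some k => k
          | none =>
            match pvContainScanA cr i options with
            | some j => j
            | none => -1)) := by
  induction options with
  | nil => intro i; exact ⟨fun j => rfl, rfl⟩
  | cons opt t ih =>
    intro i
    obtain ⟨h1, hn⟩ := ih (i + 1)
    simp only [pvAnswer] at h1 hn
    refine ⟨fun j => ?_, ?_⟩ <;>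
      simp only [pvBestScanB, pvExactScanA, pvContainScanA] <;>
      by_cases hp : PySem.Chars.strip opt.toList = cr <;>
      by_cases hq : (PySem.Chars.isIn cr opt.toList || PySem.Chars.isIn opt.toList cr) = true <;>
      simp [pvAnswer, hp, hq, h1, hn]

-- ===== VERDICT (by name: the statement is the Claim_ definition above) =====
theorem resolve_correct_index_py_spec : Claim_equal_resolve_correct_index_py := by
  intro correct_raw options _
  unfold Spec_resolve_correct_index_py resolve_correct_index_py resolve_correct_index_py_alt pvLabelIndexB
  simp only []
  by_cases h0 : (correct_raw.toList.isEmpty || options.isEmpty) = true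
  · simp [h0]
  · simp only [h0]
    by_cases h1 : (pvRstripChars (PySem.Chars.upper correct_raw.toList) [')', '.', ':', ' ']).length = 1 ∧ PySem.Chars.strIsalpha (pvRstripChars (PySem.Chars.upper correct_raw.toList) [')', '.', ':', ' ']) = true
    · simp [h1]
    · simp only [h1]
      by_cases h2 : PySem.Chars.strIsdigit correct_raw.toList = true
      · simp [h2]
      · simp only [h2]
        have h := (pvBestScanB_spec correct_raw.toList options 0).2
        simp only [pvAnswer] at h
        simp [h]
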